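-- pv_equiv track=rewrite | github.com/UKHD-NP/proteopy | proteopy/pp/quantification.py | _union_find_groups
-- ===== SOURCE A (Python) =====
-- from collections import defaultdict
--
-- def _find_root(parent, x):
--     """Find root of *x* with path compression (iterative)."""
--     while parent[x] != x:
--         parent[x] = parent[parent[x]]
--         x = parent[x]
--     return x
--
-- def _union_find_groups(peptides):
--     """Return ``{representative: [members]}`` via union-find
--     on substring containment."""
--     parent = {p: p for p in peptides}
--     rank = {p: 0 for p in peptides}
--
--     peps_by_len = sorted(peptides, key=len, reverse=True)
--     for i, longp in enumerate(peps_by_len):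
--         for shortp in peps_by_len[i + 1:]:
--             if shortp in longp:
--                 ra = _find_root(parent, longp)
--                 rb = _find_root(parent, shortp)
--                 if ra != rb:
--                     if rank[ra] < rank[rb]:
--                         ra, rb = rb, ra
--                     parent[rb] = ra
--                     if rank[ra] == rank[rb]:
--                         rank[ra] += 1
--
--     buckets = defaultdict(list)
--     for p in peptides:
--         buckets[_find_root(parent, p)].append(p)
--
--     groups = {}
--     for _, members in buckets.items():
--         rep = max(members, key=len)
--         groups[rep] = sorted(
--             members, key=lambda s: (-len(s), s),
--         )
--     return groups
-- ===== SOURCE B (Python) =====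
-- def _union_find_groups(peptides):
--     """Group peptides by substring containment, tracking an explicit
--     component label per distinct peptide (quick-find label propagation)."""
--     comp = {}
--     for p in peptides:
--         if p not in comp:
--             comp[p] = len(comp)
--
--     peps_by_len = sorted(peptides, key=len, reverse=True)
--     for i, longp in enumerate(peps_by_len):
--         for shortp in peps_by_len[i + 1:]:
--             if shortp in longp:
--                 a, b = comp[longp], comp[shortp]
--                 if a != b:
--                     for q in comp:
--                         if comp[q] == b:
--                             comp[q] = a
--
--     buckets = {}
--     for p in peptides:
--         buckets.setdefault(comp[p], []).append(p)
--
--     groups = {}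
--     for members in buckets.values():
--         rep = max(members, key=len)
--         groups[rep] = sorted(members, key=lambda s: (-len(s), s))
--     return groups
-- ===== Notes on version B (the rewrite author's own statement) =====
-- stated objective: simpler
-- what changed: A's ranked union-find (parent/rank dicts, iterative find with path compression) is replaced by an explicit component-label dict (quick-find): each distinct peptide carries an integer label and a merge simply relabels one component, so the find/rank/compression machinery disappears; bucketing keys on the label instead of re-running find.
import Mathlib
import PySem

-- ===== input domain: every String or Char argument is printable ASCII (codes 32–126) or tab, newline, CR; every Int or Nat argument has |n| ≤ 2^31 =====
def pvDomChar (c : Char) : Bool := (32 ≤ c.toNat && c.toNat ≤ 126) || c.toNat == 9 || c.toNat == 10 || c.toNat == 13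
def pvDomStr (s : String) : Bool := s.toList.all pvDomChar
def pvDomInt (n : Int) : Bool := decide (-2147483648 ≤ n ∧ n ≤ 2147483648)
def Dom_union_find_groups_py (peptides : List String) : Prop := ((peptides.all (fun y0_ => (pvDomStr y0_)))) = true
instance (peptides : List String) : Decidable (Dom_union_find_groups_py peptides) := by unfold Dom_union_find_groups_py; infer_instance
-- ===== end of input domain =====

-- B replaces A's ranked union-find with path compression by an explicit component-label
-- dict that is relabelled on each merge (quick-find); objective: simpler, not faster.

-- ===== PORT A =====
-- _find_root: Python's while-loop with path compression.  The Nat fuel (parent.size + 1)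
-- only makes the loop structurally total: on every reachable state the parent map is an
-- acyclic forest, so the fuel is never exhausted; the `none` branch mirrors Python's
-- KeyError and is likewise unreachable at call sites.
def findRootA : Nat → PySem.Dict String String → String → PySem.Dict String String × String
  | 0, parent, x => (parent, x)
  | n+1, parent, x =>
    match parent.get? x with
    | none => (parent, x)
    | some px =>
      if px = x then (parent, x)
      else
        let g := (parent.get? px).getD px
        findRootA n (parent.insert x g) g

def findRoot (parent : PySem.Dict String String) (x : String) :
    PySem.Dict String String × String := findRootA (parent.size + 1) parent x

def unionStepA (longp shortp : String)
    (st : PySem.Dict String String × PySem.Dict String Int) :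
    PySem.Dict String String × PySem.Dict String Int :=
  if PySem.Str.isIn shortp longp then
    let pa := findRoot st.1 longp
    let pb := findRoot pa.1 shortp
    if pa.2 ≠ pb.2 then
      let pr := if st.2.getD pa.2 0 < st.2.getD pb.2 0 then (pb.2, pa.2) else (pa.2, pb.2)
      (pb.1.insert pr.2 pr.1,
       if st.2.getD pr.1 0 = st.2.getD pr.2 0 then st.2.insert pr.1 (st.2.getD pr.1 0 + 1) else st.2)
    else (pb.1, st.2)
  else st

def pairLoopA : List String →
    PySem.Dict String String × PySem.Dict String Int →
    PySem.Dict String String × PySem.Dict String Int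
  | [], st => st
  | longp :: rest, st => pairLoopA rest (rest.foldl (fun st shortp => unionStepA longp shortp st) st)

def bucketStepA (st : PySem.Dict String String × PySem.Dict String (List String))
    (p : String) : PySem.Dict String String × PySem.Dict String (List String) :=
  let fr := findRoot st.1 p
  (fr.1, st.2.modify fr.2 [] (fun l => l ++ [p]))

def union_find_groups_py (peptides : List String) : List (String × List String) :=
  let parent := peptides.foldl (fun d p => d.insert p p) PySem.Dict.empty
  let rank := peptides.foldl (fun d p => d.insert p (0 : Int)) PySem.Dict.empty
  let pepsByLen := PySem.List.sorted peptides PySem.Str.len true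
  let st := pairLoopA pepsByLen (parent, rank)
  let bk := peptides.foldl bucketStepA (st.1, PySem.Dict.empty)
  -- `max(members, key=len)` raises on an empty list in Python; buckets are never empty,
  -- so the `.getD ""` default is unreachable.
  let groups := bk.2.items.foldl
    (fun (g : PySem.Dict String (List String)) kv =>
      g.insert ((PySem.List.max? kv.2 PySem.Str.len).getD "")
        (PySem.List.sorted2 kv.2 (fun s => -(PySem.Str.len s)) (fun s => s) false))
    PySem.Dict.empty
  groups.items

-- ===== PORT B =====
def relabelB (longp shortp : String) (comp : PySem.Dict String Int) : PySem.Dict String Int :=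
  if PySem.Str.isIn shortp longp then
    let a := comp.getD longp 0   -- Python comp[longp]: key always present, KeyError unreachable
    let b := comp.getD shortp 0
    if a ≠ b then
      comp.keys.foldl (fun d q => if d.getD q 0 = b then d.insert q a else d) comp
    else comp
  else comp

def pairLoopB : List String → PySem.Dict String Int → PySem.Dict String Int
  | [], c => c
  | longp :: rest, c => pairLoopB rest (rest.foldl (fun c shortp => relabelB longp shortp c) c)

def union_find_groups_py_alt (peptides : List String) : List (String × List String) :=
  let comp0 := peptides.foldl
    (fun (d : PySem.Dict String Int) p => if d.contains p then d else d.insert p (d.size : Int))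
    PySem.Dict.empty
  let comp := pairLoopB (PySem.List.sorted peptides PySem.Str.len true) comp0
  let buckets := peptides.foldl
    (fun (bk : PySem.Dict Int (List String)) p => bk.modify (comp.getD p 0) [] (fun l => l ++ [p]))
    PySem.Dict.empty
  let groups := buckets.values.foldl
    (fun (g : PySem.Dict String (List String)) members =>
      g.insert ((PySem.List.max? members PySem.Str.len).getD "")
        (PySem.List.sorted2 members (fun s => -(PySem.Str.len s)) (fun s => s) false))
    PySem.Dict.empty
  groups.items

-- ===== PRECONDITION & SPEC =====
def Spec_union_find_groups_py (peptides : List String) (out : List (String × List String)) : Prop := out = union_find_groups_py_alt peptides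
instance (peptides : List String) (out : List (String × List String)) : Decidable (Spec_union_find_groups_py peptides out) := by unfold Spec_union_find_groups_py; infer_instance

-- ===== CLAIM (what is proved, stated in full; the proofs are below) =====
def Claim_equal_union_find_groups_py : Prop := ∀ (peptides : List String), Dom_union_find_groups_py peptides → Spec_union_find_groups_py peptides (union_find_groups_py peptides)

-- ===== LEMMAS AND PROOFS =====



def pstep (d : PySem.Dict String String) (x : String) : String := (d.get? x).getD x

def DWF (d : PySem.Dict String String) : Prop := ∀ k v, d.get? k = some v → v ∈ d.keys

def stabBy (f : String → String) (x : String) (n : Nat) : Prop := f (f^[n] x) = f^[n] x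

def Stab (f : String → String) (x : String) : Prop := ∃ n, stabBy f x n

def Tame (f : String → String) : Prop := ∀ x, Stab f x

def IsRoot (f : String → String) (x r : String) : Prop := (∃ n, f^[n] x = r) ∧ f r = r

def SameRoot (f : String → String) (a b : String) : Prop := ∃ r, IsRoot f a r ∧ IsRoot f b r

lemma iterate_fixed_ge (f : String → String) (x r : String) {n m : Nat}
    (hr : f r = r) (hn : f^[n] x = r) (hm : n ≤ m) : f^[m] x = r := by
  obtain ⟨k, rfl⟩ := Nat.exists_eq_add_of_le hm
  rw [Nat.add_comm, Function.iterate_add_apply, hn]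
  exact Function.iterate_fixed hr k

lemma isRoot_unique {f : String → String} {x r s : String}
    (h1 : IsRoot f x r) (h2 : IsRoot f x s) : r = s := by
  obtain ⟨⟨n, hn⟩, hr⟩ := h1
  obtain ⟨⟨m, hm⟩, hs⟩ := h2
  rcases Nat.le_total n m with h | h
  · rw [← iterate_fixed_ge f x r hr hn h, hm]
  · rw [← iterate_fixed_ge f x s hs hm h, hn]

lemma stabBy_isRoot {f : String → String} {x : String} {n : Nat} (h : stabBy f x n) :
    IsRoot f x (f^[n] x) := ⟨⟨n, rfl⟩, h⟩

lemma stabBy_mono {f : String → String} {x : String} {n m : Nat}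
    (h : stabBy f x n) (hnm : n ≤ m) : stabBy f x m := by
  have := iterate_fixed_ge f x (f^[n] x) h rfl hnm
  unfold stabBy
  rw [this]; exact h

lemma isRoot_stab {f : String → String} {x r : String} (h : IsRoot f x r) : Stab f x := by
  obtain ⟨⟨n, hn⟩, hr⟩ := h
  exact ⟨n, by unfold stabBy; rw [hn, hr]⟩

lemma stab_bound (f : String → String) (K : List String)
    (hmv : ∀ x, f x ≠ x → x ∈ K) (x : String) (h : Stab f x) :
    stabBy f x K.length := by
  have hdec : DecidablePred (stabBy f x) := fun n => by unfold stabBy; infer_instance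
  set d := Nat.find h with hd
  have hfix : stabBy f x d := Nat.find_spec h
  have hmin : ∀ m, m < d → ¬ stabBy f x m := fun m hm => Nat.find_min h hm
  by_cases hdK : d ≤ K.length
  · exact stabBy_mono hfix hdK
  exfalso
  have hinj : ∀ i j, i < j → j ≤ d → f^[i] x ≠ f^[j] x := by
    intro i j hij hjd heq
    have hp : 0 < j - i := by omega
    have hper : f^[j - i] (f^[i] x) = f^[i] x := by
      rw [← Function.iterate_add_apply]
      have : j - i + i = j := by omega
      rw [this, ← heq]
    have hmul : ∀ t : Nat, f^[t * (j - i)] (f^[i] x) = f^[i] x := by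
      intro t
      rw [Nat.mul_comm, Function.iterate_mul]
      exact Function.iterate_fixed hper t
    have hbig : f^[d * (j - i) + i] x = f^[d] x := by
      apply iterate_fixed_ge f x (f^[d] x) hfix rfl
      calc d ≤ d * (j - i) := Nat.le_mul_of_pos_right d hp
        _ ≤ d * (j - i) + i := Nat.le_add_right _ _
    have hix : f^[i] x = f^[d] x := by
      rw [← hbig, Function.iterate_add_apply, hmul]
    exact hmin i (by omega) (by unfold stabBy; rw [hix]; exact hfix)
  have hnodup : ((List.range d).map (fun m => f^[m] x)).Nodup := by
    refine List.Nodup.map_on ?_ (List.nodup_range)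
    intro i hi j hj heq
    simp only [List.mem_range] at hi hj
    by_contra hne
    rcases Nat.lt_or_ge i j with h' | h'
    · exact hinj i j h' (by omega) heq
    · exact hinj j i (by omega) (by omega) heq.symm
  have hsub : ∀ y ∈ (List.range d).map (fun m => f^[m] x), y ∈ K := by
    intro y hy
    simp only [List.mem_map, List.mem_range] at hy
    obtain ⟨m, hm, rfl⟩ := hy
    exact hmv _ (hmin m hm)
  have hlen : ((List.range d).map (fun m => f^[m] x)).length ≤ K.length := by
    have h1 := List.toFinset_card_of_nodup hnodup
    have h2 : ((List.range d).map (fun m => f^[m] x)).toFinset ⊆ K.toFinset := by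
      intro y hy; simp only [List.mem_toFinset] at *; exact hsub y hy
    have h3 := Finset.card_le_card h2
    have h4 := K.toFinset_card_le
    omega
  simp only [List.length_map, List.length_range] at hlen
  omega
lemma compress_adv (f f' : String → String) (x : String)
    (h' : ∀ y, f' y = if y = x then f (f x) else f y) :
    ∀ (m : Nat) (y : String), ∃ k, m ≤ k ∧ f'^[m] y = f^[k] y := by
  intro m
  induction m with
  | zero => exact fun y => ⟨0, Nat.le_refl _, rfl⟩
  | succ m ih =>
    intro y
    obtain ⟨k, hk, he⟩ := ih y
    by_cases hx : f^[k] y = x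
    · refine ⟨k + 2, by omega, ?_⟩
      rw [Function.iterate_succ_apply', he, h']
      rw [if_pos hx]
      show f (f x) = f^[k + 1 + 1] y
      rw [Function.iterate_succ_apply' f (k + 1) y, Function.iterate_succ_apply' f k y, hx]
    · refine ⟨k + 1, by omega, ?_⟩
      rw [Function.iterate_succ_apply', he, h', if_neg hx,
        Function.iterate_succ_apply' f k y]

lemma compress_isRoot (f f' : String → String) (x : String) (hfx : f x ≠ x)
    (h' : ∀ y, f' y = if y = x then f (f x) else f y) :
    ∀ y r, IsRoot f y r → IsRoot f' y r := by
  rintro y r ⟨⟨n, hn⟩, hr⟩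
  have hrx : r ≠ x := fun h => hfx (by rw [← h]; exact hr)
  refine ⟨⟨n, ?_⟩, by rw [h' r, if_neg hrx]; exact hr⟩
  obtain ⟨k, hk, he⟩ := compress_adv f f' x h' n y
  rw [he]
  exact iterate_fixed_ge f y r hr hn hk

lemma union_isRoot (f f' : String → String) (ra rb : String)
    (hra : f ra = ra) (hrb : f rb = rb) (hne : ra ≠ rb)
    (h' : ∀ y, f' y = if y = rb then ra else f y) :
    ∀ y r, IsRoot f y r → IsRoot f' y (if r = rb then ra else r) := by
  rintro y r ⟨⟨n, hn⟩, hr⟩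
  have hfra : f' ra = ra := by rw [h', if_neg hne]; exact hra
  by_cases hcase : r = rb
  · subst hcase
    rw [if_pos rfl]
    have claim : ∀ m : Nat, f'^[m] y = f^[m] y ∨ f'^[m] y = ra := by
      intro m
      induction m with
      | zero => left; rfl
      | succ m ih =>
        rcases ih with h | h
        · by_cases hm : f^[m] y = r
          · right
            rw [Function.iterate_succ_apply', h, hm, h', if_pos rfl]
          · left
            rw [Function.iterate_succ_apply', h, h', if_neg hm,
              Function.iterate_succ_apply' f m y]
        · right; rw [Function.iterate_succ_apply', h, hfra]
    refine ⟨⟨n + 1, ?_⟩, hfra⟩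
    rcases claim n with h | h
    · rw [Function.iterate_succ_apply', h, hn, h', if_pos rfl]
    · rw [Function.iterate_succ_apply', h, hfra]
  · rw [if_neg hcase]
    have hnorb : ∀ m : Nat, f^[m] y ≠ rb := by
      intro m hm
      exact hcase (isRoot_unique ⟨⟨n, hn⟩, hr⟩ ⟨⟨m, hm⟩, hrb⟩)
    have claim : ∀ m : Nat, f'^[m] y = f^[m] y := by
      intro m
      induction m with
      | zero => rfl
      | succ m ih =>
        rw [Function.iterate_succ_apply', ih, h', if_neg (hnorb m),
          Function.iterate_succ_apply' f m y]
    exact ⟨⟨n, by rw [claim, hn]⟩, by rw [h', if_neg hcase]; exact hr⟩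

lemma tame_of_transfer (f g : String → String) (hT : Tame f)
    (ht : ∀ y r, IsRoot f y r → IsRoot g y r) : Tame g := by
  intro y
  obtain ⟨n, hn⟩ := hT y
  exact isRoot_stab (ht y _ (stabBy_isRoot hn))

lemma sameRoot_iff_of_transfer (f g : String → String) (hf : Tame f)
    (ht : ∀ y r, IsRoot f y r → IsRoot g y r) (a b : String) :
    SameRoot g a b ↔ SameRoot f a b := by
  constructor
  · rintro ⟨r, h1, h2⟩
    obtain ⟨na, hna⟩ := hf a
    obtain ⟨nb, hnb⟩ := hf b
    have ha := stabBy_isRoot hna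
    have hb := stabBy_isRoot hnb
    have e1 : f^[na] a = r := isRoot_unique (ht a _ ha) h1
    have e2 : f^[nb] b = r := isRoot_unique (ht b _ hb) h2
    exact ⟨r, e1 ▸ ha, e2 ▸ hb⟩
  · rintro ⟨r, h1, h2⟩
    exact ⟨r, ht a r h1, ht b r h2⟩

-- dict-level step facts
lemma pstep_insert (d : PySem.Dict String String) (x g : String) (y : String) :
    pstep (d.insert x g) y = if y = x then g else pstep d y := by
  unfold pstep
  rw [PySem.Dict.get?_insert]
  split_ifs <;> rfl

lemma pstep_mv (d : PySem.Dict String String) (x : String) (h : pstep d x ≠ x) :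
    x ∈ d.keys := by
  unfold pstep at h
  cases hx : d.get? x with
  | none => rw [hx] at h; simp at h
  | some v =>
    have : d.get? x ≠ none := by rw [hx]; simp
    rw [Ne, PySem.Dict.get?_eq_none_iff_not_mem_keys] at this
    exact not_not.mp this

lemma pstep_mem_keys (d : PySem.Dict String String) (hw : DWF d) (x : String)
    (hx : x ∈ d.keys) : pstep d x ∈ d.keys := by
  unfold pstep
  cases hg : d.get? x with
  | none => exact hx
  | some v => exact hw x v hg

lemma iterate_mem_keys (d : PySem.Dict String String) (hw : DWF d) (x : String)
    (hx : x ∈ d.keys) : ∀ n, (pstep d)^[n] x ∈ d.keys := by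
  intro n
  induction n with
  | zero => exact hx
  | succ n ih => rw [Function.iterate_succ_apply']; exact pstep_mem_keys d hw _ ih

lemma isRoot_mem_keys (d : PySem.Dict String String) (hw : DWF d) {x r : String}
    (hx : x ∈ d.keys) (h : IsRoot (pstep d) x r) : r ∈ d.keys := by
  obtain ⟨⟨n, hn⟩, _⟩ := h
  rw [← hn]
  exact iterate_mem_keys d hw x hx n

lemma keys_length_eq_size (d : PySem.Dict String String) : d.keys.length = d.size := by
  simp [PySem.Dict.keys, PySem.Dict.size]
lemma findRootA_spec : ∀ (fuel : Nat) (parent : PySem.Dict String String) (x : String) (n : Nat),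
    DWF parent → Tame (pstep parent) → stabBy (pstep parent) x n → n < fuel →
    (findRootA fuel parent x).1.keys = parent.keys ∧
    DWF (findRootA fuel parent x).1 ∧
    Tame (pstep (findRootA fuel parent x).1) ∧
    IsRoot (pstep parent) x (findRootA fuel parent x).2 ∧
    (∀ y r, IsRoot (pstep parent) y r → IsRoot (pstep (findRootA fuel parent x).1) y r) := by
  intro fuel
  induction fuel with
  | zero => intro parent x n _ _ _ h; omega
  | succ fuel ih =>
    intro parent x n hw ht hstab hfuel
    cases hget : parent.get? x with
    | none =>
      have hres : findRootA (fuel + 1) parent x = (parent, x) := by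
        simp only [findRootA, hget]
      rw [hres]
      have hfx : pstep parent x = x := by unfold pstep; rw [hget]; rfl
      exact ⟨rfl, hw, ht, ⟨⟨0, rfl⟩, hfx⟩, fun y r h => h⟩
    | some px =>
      by_cases hpx : px = x
      · have hres : findRootA (fuel + 1) parent x = (parent, x) := by
          simp [findRootA, hget, hpx]
        rw [hres]
        have hfx : pstep parent x = x := by unfold pstep; rw [hget]; exact hpx
        exact ⟨rfl, hw, ht, ⟨⟨0, rfl⟩, hfx⟩, fun y r h => h⟩
      · have hfx0 : pstep parent x = px := by unfold pstep; rw [hget]; rfl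
        set f := pstep parent with hf
        have hfx : f x = px := hfx0
        have hfxne : f x ≠ x := by rw [hfx]; exact hpx
        set g := (parent.get? px).getD px with hg
        have hgf : g = f (f x) := by rw [hfx]; rfl
        set parent' := parent.insert x g with hp'
        have hres : findRootA (fuel + 1) parent x = findRootA fuel parent' g := by
          simp [findRootA, hget, hpx]
          rfl
        have h' : ∀ y, pstep parent' y = if y = x then f (f x) else f y := by
          intro y; rw [← hgf]; exact pstep_insert parent x g y
        have hxmem : x ∈ parent.keys := pstep_mv parent x hfxne
        have hkeys' : parent'.keys = parent.keys := by
          apply PySem.Dict.keys_insert_of_contains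
          rw [PySem.Dict.contains_iff_mem_keys]; exact hxmem
        have hgmem : g ∈ parent.keys := by
          rw [hgf]
          exact pstep_mem_keys parent hw _ (pstep_mem_keys parent hw x hxmem)
        have hw' : DWF parent' := by
          intro k v hkv
          rw [PySem.Dict.get?_insert] at hkv
          rw [hkeys']
          split_ifs at hkv with hk
          · cases hkv; exact hgmem
          · exact hw k v hkv
        have htrans : ∀ y r, IsRoot f y r → IsRoot (pstep parent') y r :=
          compress_isRoot f (pstep parent') x hfxne h'
        have ht' : Tame (pstep parent') := tame_of_transfer f _ ht htrans
        have hn1 : 1 ≤ n := by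
          by_contra h
          have : n = 0 := by omega
          subst this
          exact hfxne hstab
        set r := f^[n] x with hr
        have hfr : f r = r := hstab
        have hrx : r ≠ x := fun h => hfxne (by rw [← h] at *; exact hfr)
        have hfr' : pstep parent' r = r := by rw [h', if_neg hrx]; exact hfr
        have hstab' : stabBy (pstep parent') g (n - 1) := by
          obtain ⟨k, hk, he⟩ := compress_adv f (pstep parent') x h' (n - 1) g
          have h2 : f^[k] g = f^[k + 2] x := by
            rw [hgf, show f (f x) = f^[2] x by
              rw [Function.iterate_succ_apply' f 1 x, Function.iterate_succ_apply' f 0 x]; rfl,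
              ← Function.iterate_add_apply]
          have h3 : f^[k + 2] x = r := iterate_fixed_ge f x r hfr rfl (by omega)
          have h4 : (pstep parent')^[n-1] g = r := by rw [he, h2, h3]
          unfold stabBy
          rw [h4]; exact hfr'
        obtain ⟨ik, iw, it, iroot, itr⟩ := ih parent' g (n - 1) hw' ht' hstab' (by omega)
        have hroot' : IsRoot (pstep parent') g r := by
          refine ⟨⟨n - 1, ?_⟩, hfr'⟩
          obtain ⟨k, hk, he⟩ := compress_adv f (pstep parent') x h' (n - 1) g
          have h2 : f^[k] g = f^[k + 2] x := by
            rw [hgf, show f (f x) = f^[2] x by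
              rw [Function.iterate_succ_apply' f 1 x, Function.iterate_succ_apply' f 0 x]; rfl,
              ← Function.iterate_add_apply]
          rw [he, h2]
          exact iterate_fixed_ge f x r hfr rfl (by omega)
        have hreq : (findRootA fuel parent' g).2 = r := isRoot_unique iroot hroot'
        rw [hres]
        refine ⟨by rw [ik, hkeys'], iw, it, ?_, fun y r0 h => itr y r0 (htrans y r0 h)⟩
        rw [hreq]
        exact ⟨⟨n, rfl⟩, hfr⟩

lemma findRoot_spec (parent : PySem.Dict String String) (x : String)
    (hw : DWF parent) (ht : Tame (pstep parent)) :
    (findRoot parent x).1.keys = parent.keys ∧ DWF (findRoot parent x).1 ∧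
    Tame (pstep (findRoot parent x).1) ∧ IsRoot (pstep parent) x (findRoot parent x).2 ∧
    (∀ y r, IsRoot (pstep parent) y r → IsRoot (pstep (findRoot parent x).1) y r) := by
  apply findRootA_spec (parent.size + 1) parent x parent.keys.length hw ht
  · exact stab_bound (pstep parent) parent.keys (pstep_mv parent) x (ht x)
  · rw [keys_length_eq_size]; omega
def PInv (parent : PySem.Dict String String) (comp : PySem.Dict String Int)
    (K : List String) : Prop :=
  parent.keys = K ∧ comp.keys = K ∧ K.Nodup ∧ DWF parent ∧ Tame (pstep parent) ∧
  (∀ a b, a ∈ K → b ∈ K →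
    (SameRoot (pstep parent) a b ↔ comp.getD a 0 = comp.getD b 0))

lemma foldl_insert_self_get? (l : List String) :
    ∀ (d : PySem.Dict String String) (x : String),
    (l.foldl (fun d p => d.insert p p) d).get? x = if x ∈ l then some x else d.get? x := by
  induction l with
  | nil => intro d x; simp
  | cons p rest ih =>
    intro d x
    rw [List.foldl_cons, ih]
    by_cases hx : x ∈ rest
    · simp [hx]
    · rw [if_neg hx, PySem.Dict.get?_insert]
      by_cases hxp : x = p
      · subst hxp; simp
      · simp [hxp, hx]

lemma keys_init_eq (l : List String) :
    ∀ (d1 : PySem.Dict String String) (d2 : PySem.Dict String Int), d1.keys = d2.keys →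
    (l.foldl (fun d p => d.insert p p) d1).keys =
    (l.foldl (fun (d : PySem.Dict String Int) p =>
        if d.contains p then d else d.insert p (d.size : Int)) d2).keys := by
  induction l with
  | nil => intro d1 d2 h; exact h
  | cons p rest ih =>
    intro d1 d2 h
    rw [List.foldl_cons, List.foldl_cons]
    apply ih
    by_cases hc : d2.contains p
    · have hc1 : d1.contains p := by
        rw [PySem.Dict.contains_iff_mem_keys] at *
        rw [h]; exact hc
      rw [if_pos hc, PySem.Dict.keys_insert_of_contains d1 p hc1, h]
    · have hc2 : d2.contains p = false := by simpa using hc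
      have hc1 : d1.contains p = false := by
        have hp : p ∉ d2.keys := by rw [← PySem.Dict.contains_iff_mem_keys]; simp [hc2]
        rw [Bool.eq_false_iff, Ne, PySem.Dict.contains_iff_mem_keys, h]
        exact hp
      rw [if_neg hc, PySem.Dict.keys_insert_of_not_contains d1 p hc1,
        PySem.Dict.keys_insert_of_not_contains d2 _ hc2, h]

def Qinj (d : PySem.Dict String Int) : Prop :=
  (∀ k, k ∈ d.keys → 0 ≤ d.getD k 0 ∧ d.getD k 0 < (d.size : Int)) ∧
  (∀ k k', k ∈ d.keys → k' ∈ d.keys → d.getD k 0 = d.getD k' 0 → k = k')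

lemma comp0_Q (l : List String) :
    ∀ d, Qinj d → Qinj (l.foldl (fun (d : PySem.Dict String Int) p =>
      if d.contains p then d else d.insert p (d.size : Int)) d) := by
  induction l with
  | nil => intro d h; exact h
  | cons p rest ih =>
    intro d hQ
    rw [List.foldl_cons]
    apply ih
    by_cases hc : d.contains p
    · rw [if_pos hc]; exact hQ
    · rw [if_neg hc]
      have hc' : d.contains p = false := by simpa using hc
      have hpk : p ∉ d.keys := by
        rw [← PySem.Dict.contains_iff_mem_keys]; simp [hc']
      have hkeys : (d.insert p (d.size : Int)).keys = d.keys ++ [p] :=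
        PySem.Dict.keys_insert_of_not_contains d _ hc'
      have hsize : (d.insert p (d.size : Int)).size = d.size + 1 := by
        rw [PySem.Dict.size_insert, if_neg (by simp [hc'])]
      constructor
      · intro k hk
        rw [hkeys, List.mem_append, List.mem_singleton] at hk
        rw [hsize, PySem.Dict.getD_insert]
        rcases hk with hk | rfl
        · rw [if_neg (by rintro rfl; exact hpk hk)]
          have := hQ.1 k hk
          push_cast
          omega
        · rw [if_pos rfl]
          push_cast
          omega
      · intro k k' hk hk'
        rw [hkeys, List.mem_append, List.mem_singleton] at hk hk'
        rw [PySem.Dict.getD_insert, PySem.Dict.getD_insert]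
        rcases hk with hk | rfl <;> rcases hk' with hk' | rfl
        · rw [if_neg (by rintro rfl; exact hpk hk), if_neg (by rintro rfl; exact hpk hk')]
          exact hQ.2 k k' hk hk'
        · rw [if_neg (by rintro rfl; exact hpk hk), if_pos rfl]
          intro h
          exact absurd h (by have := hQ.1 k hk; omega)
        · rw [if_pos rfl, if_neg (by rintro rfl; exact hpk hk')]
          intro h
          exact absurd h (by have := hQ.1 k' hk'; omega)
        · intro _; rfl

lemma relabel_fold (a b : Int) :
    ∀ (ks : List String) (d : PySem.Dict String Int), ks.Nodup → (∀ q ∈ ks, q ∈ d.keys) →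
    (ks.foldl (fun d q => if d.getD q 0 = b then d.insert q a else d) d).keys = d.keys ∧
    (∀ q, (ks.foldl (fun d q => if d.getD q 0 = b then d.insert q a else d) d).getD q 0 =
      if q ∈ ks ∧ d.getD q 0 = b then a else d.getD q 0) := by
  intro ks
  induction ks with
  | nil => intro d _ _; exact ⟨rfl, fun q => by simp⟩
  | cons p rest ih =>
    intro d hnd hks
    have hpd : p ∈ d.keys := hks p (List.mem_cons_self)
    rw [List.foldl_cons]
    set d1 := if d.getD p 0 = b then d.insert p a else d with hd1
    have hk1 : d1.keys = d.keys := by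
      rw [hd1]
      split_ifs with h
      · exact PySem.Dict.keys_insert_of_contains d a (by rwa [PySem.Dict.contains_iff_mem_keys])
      · rfl
    have hg1 : ∀ q, d1.getD q 0 = if q = p ∧ d.getD p 0 = b then a else d.getD q 0 := by
      intro q
      rw [hd1]
      split_ifs with h1 h2 h3
      · rw [h2.1, PySem.Dict.getD_insert, if_pos rfl]
      · rw [PySem.Dict.getD_insert, if_neg (by intro h; exact h2 ⟨h, h1⟩)]
      · exact absurd h3.2 h1
      · rfl
    obtain ⟨ihk, ihg⟩ := ih d1 (List.Nodup.of_cons hnd)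
      (fun q hq => by rw [hk1]; exact hks q (List.mem_cons_of_mem p hq))
    refine ⟨by rw [ihk, hk1], ?_⟩
    intro q
    have hpn : p ∉ rest := (List.nodup_cons.mp hnd).1
    rw [ihg q, hg1 q]
    simp only [List.mem_cons]
    rcases eq_or_ne q p with rfl | hqp
    · split_ifs <;> (try rfl) <;> tauto
    · split_ifs <;> (try rfl) <;> tauto
lemma sameRoot_iff_root_eq {g : String → String} {p q a b : String}
    (hp : IsRoot g p a) (hq : IsRoot g q b) : SameRoot g p q ↔ a = b := by
  constructor
  · rintro ⟨r, h1, h2⟩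
    rw [isRoot_unique hp h1, isRoot_unique hq h2]
  · rintro rfl
    exact ⟨a, hp, hq⟩

lemma merge_eq_iff {α : Type} [DecidableEq α] (A B x y : α) (hAB : A ≠ B) :
    ((if x = B then A else x) = (if y = B then A else y)) ↔
    (x = y ∨ (x = A ∨ x = B) ∧ (y = A ∨ y = B)) := by
  constructor
  · intro h
    by_cases h1 : x = B <;> by_cases h2 : y = B
    · right; exact ⟨Or.inr h1, Or.inr h2⟩
    · rw [if_pos h1, if_neg h2] at h; right; exact ⟨Or.inr h1, Or.inl h.symm⟩
    · rw [if_neg h1, if_pos h2] at h; right; exact ⟨Or.inl h, Or.inr h2⟩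
    · rw [if_neg h1, if_neg h2] at h; left; exact h
  · intro h
    rcases h with rfl | ⟨hx, hy⟩
    · rfl
    · rcases hx with rfl | rfl <;> rcases hy with rfl | rfl <;> simp [hAB]

set_option maxHeartbeats 2000000 in
lemma step_inv (K : List String) (longp shortp : String)
    (hl : longp ∈ K) (hs : shortp ∈ K)
    (parent : PySem.Dict String String) (rank : PySem.Dict String Int)
    (comp : PySem.Dict String Int) (h : PInv parent comp K) :
    PInv (unionStepA longp shortp (parent, rank)).1 (relabelB longp shortp comp) K := by
  obtain ⟨hpk, hck, hnd, hw, ht, hpart⟩ := h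
  by_cases hin : PySem.Str.isIn shortp longp = true
  case neg =>
    unfold unionStepA relabelB
    simp only [if_neg hin]
    exact ⟨hpk, hck, hnd, hw, ht, hpart⟩
  set f := pstep parent with hf
  obtain ⟨k1, w1, t1, r1, tr1⟩ := findRoot_spec parent longp hw ht
  obtain ⟨k2, w2, t2, r2, tr2⟩ := findRoot_spec (findRoot parent longp).1 shortp w1 t1
  set pa := findRoot parent longp with hpa
  set pb := findRoot pa.1 shortp with hpb
  have hra : IsRoot f longp pa.2 := r1
  obtain ⟨ns, hns⟩ := ht shortp
  have hrbf : IsRoot f shortp (f^[ns] shortp) := stabBy_isRoot hns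
  have hrb : IsRoot f shortp pb.2 := by
    have h2 := tr1 shortp _ hrbf
    have heq2 := isRoot_unique r2 h2
    rw [heq2]; exact hrbf
  have hSR1 : ∀ x y, SameRoot (pstep pa.1) x y ↔ SameRoot f x y :=
    sameRoot_iff_of_transfer f (pstep pa.1) ht tr1
  have hSR2 : ∀ x y, SameRoot (pstep pb.1) x y ↔ SameRoot f x y := fun x y => by
    rw [sameRoot_iff_of_transfer (pstep pa.1) (pstep pb.1) t1 tr2, hSR1]
  have hbr : pa.2 = pb.2 ↔ comp.getD longp 0 = comp.getD shortp 0 := by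
    rw [← hpart longp shortp hl hs]
    constructor
    · intro he; exact ⟨pb.2, he ▸ hra, hrb⟩
    · rintro ⟨r, h1, h2⟩; rw [isRoot_unique hra h1, isRoot_unique hrb h2]
  by_cases heq : pa.2 = pb.2
  · -- roots already equal: A only compresses, B leaves comp unchanged
    have hAeq : (unionStepA longp shortp (parent, rank)).1 = pb.1 := by
      unfold unionStepA
      simp only [if_pos hin, ← hpa, ← hpb, if_neg (not_not.mpr heq)]
    have hBeq : relabelB longp shortp comp = comp := by
      unfold relabelB
      simp only [if_pos hin, if_neg (not_not.mpr (hbr.mp heq))]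
    rw [hAeq, hBeq]
    refine ⟨by rw [k2, k1, hpk], hck, hnd, w2, t2, ?_⟩
    intro a b ha hb
    rw [hSR2, hpart a b ha hb]
  · -- genuine union
    set la := comp.getD longp 0 with hla
    set lb := comp.getD shortp 0 with hlb
    have hlne : la ≠ lb := fun hc => heq (hbr.mpr hc)
    set pr := if rank.getD pa.2 0 < rank.getD pb.2 0 then (pb.2, pa.2) else (pa.2, pb.2) with hpr
    have hAeq : (unionStepA longp shortp (parent, rank)).1 = pb.1.insert pr.2 pr.1 := by
      unfold unionStepA
      simp only [if_pos hin, ← hpa, ← hpb]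
      rw [if_pos (by exact heq)]
    have hcases : (pr.1 = pa.2 ∧ pr.2 = pb.2) ∨ (pr.1 = pb.2 ∧ pr.2 = pa.2) := by
      rw [hpr]; split_ifs
      · right; exact ⟨rfl, rfl⟩
      · left; exact ⟨rfl, rfl⟩
    have hprne : pr.1 ≠ pr.2 := by
      rcases hcases with ⟨h1, h2⟩ | ⟨h1, h2⟩ <;> rw [h1, h2]
      · exact heq
      · exact fun hcc => heq hcc.symm
    have hBeq : relabelB longp shortp comp =
        comp.keys.foldl (fun d q => if d.getD q 0 = lb then d.insert q la else d) comp := by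
      unfold relabelB
      rw [if_pos hin, if_pos (by exact hlne)]
    -- A side roots at the pb.1 level
    have hra2 : IsRoot (pstep pb.1) longp pa.2 := tr2 _ _ (tr1 _ _ hra)
    have hrb2 : IsRoot (pstep pb.1) shortp pb.2 := tr2 _ _ r2
    have hmema : pa.2 ∈ K := by
      rw [← hpk]; exact isRoot_mem_keys parent hw (by rw [hpk]; exact hl) hra
    have hmemb : pb.2 ∈ K := by
      rw [← hpk]; exact isRoot_mem_keys parent hw (by rw [hpk]; exact hs) hrb
    have hfa2 : pstep pb.1 pa.2 = pa.2 := hra2.2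
    have hfb2 : pstep pb.1 pb.2 = pb.2 := hrb2.2
    have hfpr1 : pstep pb.1 pr.1 = pr.1 := by
      rcases hcases with ⟨h1, _⟩ | ⟨h1, _⟩ <;> rw [h1]
      · exact hfa2
      · exact hfb2
    have hfpr2 : pstep pb.1 pr.2 = pr.2 := by
      rcases hcases with ⟨_, h2⟩ | ⟨_, h2⟩ <;> rw [h2]
      · exact hfb2
      · exact hfa2
    set par2 := pb.1.insert pr.2 pr.1 with hpar2
    have h' : ∀ y, pstep par2 y = if y = pr.2 then pr.1 else pstep pb.1 y :=
      fun y => pstep_insert pb.1 pr.2 pr.1 y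
    have htrU : ∀ y r, IsRoot (pstep pb.1) y r →
        IsRoot (pstep par2) y (if r = pr.2 then pr.1 else r) :=
      union_isRoot (pstep pb.1) (pstep par2) pr.1 pr.2 hfpr1 hfpr2 hprne h'
    have hk3 : par2.keys = K := by
      rw [hpar2, PySem.Dict.keys_insert_of_contains pb.1 pr.1
        (by rw [PySem.Dict.contains_iff_mem_keys, k2, k1, hpk]
            rcases hcases with ⟨_, h2⟩ | ⟨_, h2⟩ <;> rw [h2]
            · exact hmemb
            · exact hmema), k2, k1, hpk]
    have hw3 : DWF par2 := by
      intro k v hkv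
      rw [hpar2, PySem.Dict.get?_insert] at hkv
      have hkk : par2.keys = pb.1.keys := by rw [hk3, k2, k1, hpk]
      rw [hkk]
      split_ifs at hkv with hk
      · cases hkv
        rw [k2, k1, hpk]
        rcases hcases with ⟨h1, _⟩ | ⟨h1, _⟩ <;> rw [h1]
        · exact hmema
        · exact hmemb
      · exact w2 k v hkv
    have ht3 : Tame (pstep par2) := by
      intro y
      obtain ⟨n, hn⟩ := t2 y
      exact isRoot_stab (htrU y _ (stabBy_isRoot hn))
    obtain ⟨hkeysC, hlabC⟩ := relabel_fold la lb comp.keys comp (by rw [hck]; exact hnd) (fun q hq => hq)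
    refine ⟨by rw [hAeq, hk3], by rw [hBeq, hkeysC, hck], hnd, by rw [hAeq]; exact hw3,
      by rw [hAeq]; exact ht3, ?_⟩
    intro p q hp hq
    rw [hAeq, hBeq]
    obtain ⟨np, hnp⟩ := t2 p
    obtain ⟨nq, hnq⟩ := t2 q
    set rp := (pstep pb.1)^[np] p with hrpdef
    set rq := (pstep pb.1)^[nq] q with hrqdef
    have hrp : IsRoot (pstep pb.1) p rp := stabBy_isRoot hnp
    have hrq : IsRoot (pstep pb.1) q rq := stabBy_isRoot hnq
    have hlabp : (comp.keys.foldl (fun d q => if d.getD q 0 = lb then d.insert q la else d) comp).getD p 0 =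
        if comp.getD p 0 = lb then la else comp.getD p 0 := by
      rw [hlabC p, if_congr (and_iff_right (by rw [hck]; exact hp)) rfl rfl]
    have hlabq : (comp.keys.foldl (fun d q => if d.getD q 0 = lb then d.insert q la else d) comp).getD q 0 =
        if comp.getD q 0 = lb then la else comp.getD q 0 := by
      rw [hlabC q, if_congr (and_iff_right (by rw [hck]; exact hq)) rfl rfl]
    rw [hlabp, hlabq,
      sameRoot_iff_root_eq (htrU p rp hrp) (htrU q rq hrq),
      merge_eq_iff pr.1 pr.2 rp rq hprne,
      merge_eq_iff la lb (comp.getD p 0) (comp.getD q 0) hlne]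
    -- bridges
    have B1 : rp = rq ↔ comp.getD p 0 = comp.getD q 0 := by
      rw [← hpart p q hp hq, ← hSR2, sameRoot_iff_root_eq hrp hrq]
    have B2 : rp = pa.2 ↔ comp.getD p 0 = la := by
      rw [hla, ← hpart p longp hp hl, ← hSR2, sameRoot_iff_root_eq hrp hra2]
    have B3 : rp = pb.2 ↔ comp.getD p 0 = lb := by
      rw [hlb, ← hpart p shortp hp hs, ← hSR2, sameRoot_iff_root_eq hrp hrb2]
    have B4 : rq = pa.2 ↔ comp.getD q 0 = la := by
      rw [hla, ← hpart q longp hq hl, ← hSR2, sameRoot_iff_root_eq hrq hra2]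
    have B5 : rq = pb.2 ↔ comp.getD q 0 = lb := by
      rw [hlb, ← hpart q shortp hq hs, ← hSR2, sameRoot_iff_root_eq hrq hrb2]
    clear_value rp rq la lb pr pa pb
    clear hlabp hlabq hlabC hkeysC htrU h' hfpr1 hfpr2 hfa2 hfb2 hbr hrbf hns hpart
    rcases hcases with ⟨h1, h2⟩ | ⟨h1, h2⟩ <;> rw [h1, h2, B1, B2, B3, B4, B5] <;> tauto
lemma fold_inner_inv (K : List String) (longp : String) (hl : longp ∈ K) :
    ∀ (xs : List String), (∀ s ∈ xs, s ∈ K) →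
    ∀ (st : PySem.Dict String String × PySem.Dict String Int) (comp : PySem.Dict String Int),
    PInv st.1 comp K →
    PInv (xs.foldl (fun st shortp => unionStepA longp shortp st) st).1
         (xs.foldl (fun c shortp => relabelB longp shortp c) comp) K := by
  intro xs
  induction xs with
  | nil => intro _ st comp h; exact h
  | cons s rest ih =>
    intro hxs st comp h
    rw [List.foldl_cons, List.foldl_cons]
    exact ih (fun t htm => hxs t (List.mem_cons_of_mem s htm))
      (unionStepA longp s st) (relabelB longp s comp)
      (step_inv K longp s hl (hxs s List.mem_cons_self) st.1 st.2 comp h)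

lemma pairLoop_inv (K : List String) :
    ∀ (l : List String), (∀ s ∈ l, s ∈ K) →
    ∀ (st : PySem.Dict String String × PySem.Dict String Int) (comp : PySem.Dict String Int),
    PInv st.1 comp K →
    PInv (pairLoopA l st).1 (pairLoopB l comp) K := by
  intro l
  induction l with
  | nil => intro _ st comp h; exact h
  | cons p rest ih =>
    intro hm st comp h
    show PInv (pairLoopA rest _).1 (pairLoopB rest _) K
    exact ih (fun s hsm => hm s (List.mem_cons_of_mem p hsm)) _ _
      (fold_inner_inv K p (hm p List.mem_cons_self) rest
        (fun s hsm => hm s (List.mem_cons_of_mem p hsm)) st comp h)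

lemma iterate_id (f : String → String) (hid : ∀ x, f x = x) :
    ∀ (n : Nat) (x : String), f^[n] x = x := by
  intro n
  induction n with
  | zero => intro x; rfl
  | succ n ihn => intro x; rw [Function.iterate_succ_apply', ihn, hid]

lemma mem_K_of_mem (peptides : List String) (p : String) (hp : p ∈ peptides) :
    p ∈ (peptides.foldl (fun d p => d.insert p p) PySem.Dict.empty).keys := by
  have hg : (peptides.foldl (fun d p => d.insert p p) PySem.Dict.empty).get? p = some p := by
    rw [foldl_insert_self_get?, if_pos hp]
  by_contra hc
  rw [← PySem.Dict.get?_eq_none_iff_not_mem_keys] at hc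
  rw [hg] at hc
  simp at hc

lemma inv_init (peptides : List String) :
    PInv (peptides.foldl (fun d p => d.insert p p) PySem.Dict.empty)
         (peptides.foldl (fun (d : PySem.Dict String Int) p =>
            if d.contains p then d else d.insert p (d.size : Int)) PySem.Dict.empty)
         (peptides.foldl (fun d p => d.insert p p) PySem.Dict.empty).keys := by
  set P := peptides.foldl (fun d p => d.insert p p) PySem.Dict.empty with hP
  set C := peptides.foldl (fun (d : PySem.Dict String Int) p =>
      if d.contains p then d else d.insert p (d.size : Int)) PySem.Dict.empty with hC
  have hkeq : P.keys = C.keys := by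
    rw [hP, hC]
    exact keys_init_eq peptides PySem.Dict.empty PySem.Dict.empty rfl
  have hid : ∀ x, pstep P x = x := by
    intro x
    unfold pstep
    rw [hP, foldl_insert_self_get?]
    split_ifs
    · rfl
    · rw [PySem.Dict.get?_empty]; rfl
  have hQ : Qinj C := by
    rw [hC]
    apply comp0_Q
    constructor
    · intro k hk
      simp [PySem.Dict.keys_empty] at hk
    · intro k k' hk _
      simp [PySem.Dict.keys_empty] at hk
  refine ⟨rfl, hkeq.symm, ?_, ?_, ?_, ?_⟩
  · rw [hP]
    exact PySem.Dict.nodup_keys_foldl_insert peptides (fun _ x => x) _ PySem.Dict.nodup_keys_empty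
  · intro k v hkv
    rw [hP, foldl_insert_self_get?] at hkv
    split_ifs at hkv with hk
    · cases hkv
      exact mem_K_of_mem peptides k hk
    · rw [PySem.Dict.get?_empty] at hkv
      simp at hkv
  · intro x
    exact ⟨0, by unfold stabBy; rw [Function.iterate_zero_apply, hid]⟩
  · intro a b ha hb
    have hroot : ∀ x, IsRoot (pstep P) x x := fun x => ⟨⟨0, rfl⟩, hid x⟩
    have hself : ∀ x r, IsRoot (pstep P) x r → r = x := by
      rintro x r ⟨⟨n, hn⟩, _⟩
      rw [← hn, iterate_id (pstep P) hid]
    constructor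
    · rintro ⟨r, h1, h2⟩
      rw [← hself a r h1, ← hself b r h2]
    · intro hab
      have := hQ.2 a b (by rw [← hkeq]; exact ha) (by rw [← hkeq]; exact hb) hab
      exact ⟨a, hroot a, this ▸ hroot a⟩
def BRel (g : String → String) (comp : PySem.Dict String Int) (K : List String)
    (bA : PySem.Dict String (List String)) (bB : PySem.Dict Int (List String))
    (hs : List String) : Prop :=
  (∀ h ∈ hs, h ∈ K) ∧
  List.Forall₂ (fun (kv : String × List String) (h : String) => IsRoot g h kv.1) bA.items hs ∧
  List.Forall₂ (fun (kv : Int × List String) (h : String) => kv.1 = comp.getD h 0) bB.items hs ∧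
  bA.items.map Prod.snd = bB.items.map Prod.snd ∧
  hs.Pairwise (fun h1 h2 => ¬ SameRoot g h1 h2)

lemma forall2_strengthen {α : Type} {R : α → String → Prop} {P : String → Prop} :
    ∀ {l1 : List α} {l2 : List String}, List.Forall₂ R l1 l2 → (∀ b ∈ l2, P b) →
    List.Forall₂ (fun a b => R a b ∧ P b) l1 l2 := by
  intro l1 l2 h
  induction h with
  | nil => intro _; exact List.Forall₂.nil
  | cons ha hfa ih =>
    intro hp
    exact List.Forall₂.cons ⟨ha, hp _ List.mem_cons_self⟩
      (ih (fun b hb => hp b (List.mem_cons_of_mem _ hb)))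

lemma forall2_exists_left {α : Type} {R : α → String → Prop} :
    ∀ {l1 : List α} {l2 : List String}, List.Forall₂ R l1 l2 →
    ∀ b ∈ l2, ∃ a ∈ l1, R a b := by
  intro l1 l2 h
  induction h with
  | nil => intro b hb; cases hb
  | cons ha _ ih =>
    intro b hb
    rcases List.mem_cons.mp hb with rfl | hb'
    · exact ⟨_, List.mem_cons_self, ha⟩
    · obtain ⟨a, ha', hr⟩ := ih b hb'
      exact ⟨a, List.mem_cons_of_mem _ ha', hr⟩

lemma forall2_append {α β : Type} {R : α → β → Prop} {l1 u1 : List α} {l2 u2 : List β}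
    (h1 : List.Forall₂ R l1 l2) (h2 : List.Forall₂ R u1 u2) :
    List.Forall₂ R (l1 ++ u1) (l2 ++ u2) := by
  induction h1 with
  | nil => exact h2
  | cons ha _ ih => exact List.Forall₂.cons ha ih

lemma forall2_combine {RA : String × List String → String → Prop}
    {RB : Int × List String → String → Prop}
    (C : (String × List String) → (Int × List String) → Prop)
    (hC : ∀ kvA kvB h, RA kvA h → RB kvB h → kvA.2 = kvB.2 → C kvA kvB) :
    ∀ (hs : List String) (iA : List (String × List String)) (iB : List (Int × List String)),
    List.Forall₂ RA iA hs → List.Forall₂ RB iB hs → iA.map Prod.snd = iB.map Prod.snd →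
    List.Forall₂ C iA iB := by
  intro hs
  induction hs with
  | nil =>
    intro iA iB fA fB _
    cases fA; cases fB
    exact List.Forall₂.nil
  | cons h t ih =>
    intro iA iB fA fB hv
    cases fA with
    | cons ha hfa =>
      cases fB with
      | cons hb hfb =>
        simp only [List.map_cons, List.cons.injEq] at hv
        exact List.Forall₂.cons (hC _ _ _ ha hb hv.1) (ih _ _ hfa hfb hv.2)

lemma crel_find_any (rp : String) (lp : Int) :
    ∀ {iA : List (String × List String)} {iB : List (Int × List String)},
    List.Forall₂ (fun kvA kvB => ((kvA.1 = rp ↔ kvB.1 = lp) ∧ kvA.2 = kvB.2 :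
      Prop)) iA iB →
    ((iA.find? (fun kv => kv.1 == rp)).map Prod.snd =
      (iB.find? (fun kv => kv.1 == lp)).map Prod.snd) ∧
    (iA.any (fun kv => kv.1 == rp) = iB.any (fun kv => kv.1 == lp)) := by
  intro iA iB h
  induction h with
  | nil => exact ⟨rfl, rfl⟩
  | @cons a b l1 l2 hab hf ih =>
    obtain ⟨hiff, hsnd⟩ := hab
    by_cases hk : a.1 = rp
    · have hk' : b.1 = lp := hiff.mp hk
      constructor
      · rw [List.find?_cons_of_pos (by simp [hk]), List.find?_cons_of_pos (by simp [hk'])]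
        simp [hsnd]
      · simp [hk, hk']
    · have hk' : ¬ b.1 = lp := fun hc => hk (hiff.mpr hc)
      constructor
      · rw [List.find?_cons_of_neg (by simp [hk]), List.find?_cons_of_neg (by simp [hk'])]
        exact ih.1
      · have e1 : (a.1 == rp) = false := beq_eq_false_iff_ne.mpr hk
        have e2 : (b.1 == lp) = false := beq_eq_false_iff_ne.mpr hk'
        simp [e1, e2, ih.2]

lemma crel_replace_snd (rp : String) (lp : Int) (v' : List String) :
    ∀ {iA : List (String × List String)} {iB : List (Int × List String)},
    List.Forall₂ (fun kvA kvB => ((kvA.1 = rp ↔ kvB.1 = lp) ∧ kvA.2 = kvB.2 :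
      Prop)) iA iB →
    (iA.map (fun kv => if kv.1 == rp then (rp, v') else kv)).map Prod.snd =
    (iB.map (fun kv => if kv.1 == lp then (lp, v') else kv)).map Prod.snd := by
  intro iA iB h
  induction h with
  | nil => rfl
  | @cons a b l1 l2 hab hf ih =>
    obtain ⟨hiff, hsnd⟩ := hab
    simp only [List.map_cons]
    by_cases hk : a.1 = rp
    · rw [if_pos (by simp [hk]), if_pos (by simp [hiff.mp hk])]
      exact congrArg₂ List.cons rfl ih
    · rw [if_neg (by simp [hk]),
        if_neg (by simp only [beq_iff_eq]; exact fun hc => hk (hiff.mpr hc))]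
      exact congrArg₂ List.cons hsnd ih

lemma brel_step (g : String → String) (comp : PySem.Dict String Int) (K : List String)
    (bA : PySem.Dict String (List String)) (bB : PySem.Dict Int (List String))
    (hs : List String) (hB : BRel g comp K bA bB hs)
    (p : String) (hpK : p ∈ K) (rp : String) (hrp : IsRoot g p rp)
    (hiff : ∀ h ∈ K, (SameRoot g p h ↔ comp.getD p 0 = comp.getD h 0)) :
    ∃ hs', BRel g comp K (bA.modify rp [] (fun l => l ++ [p]))
      (bB.modify (comp.getD p 0) [] (fun l => l ++ [p])) hs' := by
  obtain ⟨hKs, fA, fB, hv, pw⟩ := hB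
  set lp := comp.getD p 0 with hlp
  have fA2 := forall2_strengthen fA hKs
  have hCrel : List.Forall₂ (fun (kvA : String × List String) (kvB : Int × List String) =>
      ((kvA.1 = rp ↔ kvB.1 = lp) ∧ kvA.2 = kvB.2 : Prop)) bA.items bB.items := by
    apply forall2_combine _ ?_ hs _ _ fA2 fB hv
    rintro kvA kvB h ⟨hA, hK⟩ hBk hsnd
    refine ⟨?_, hsnd⟩
    have hbridge : SameRoot g p h ↔ lp = comp.getD h 0 := hiff h hK
    constructor
    · intro he
      rw [hBk]
      exact (hbridge.mp ⟨rp, hrp, he ▸ hA⟩).symm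
    · intro he
      obtain ⟨r, h1, h2⟩ := hbridge.mpr (by rw [hBk] at he; exact he.symm)
      rw [isRoot_unique hA h2, isRoot_unique h1 hrp]
  obtain ⟨hfind, hany⟩ := crel_find_any rp lp hCrel
  have hcontains : bA.contains rp = bB.contains lp := hany
  have hgetD : bA.getD rp [] = bB.getD lp [] := by
    exact congrArg (fun o => Option.getD o []) hfind
  unfold PySem.Dict.modify
  by_cases hc : bA.contains rp = true
  · -- both buckets exist: in-place replacement, hs unchanged
    have hc' : bB.contains lp = true := by rw [← hcontains]; exact hc
    refine ⟨hs, hKs, ?_, ?_, ?_, pw⟩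
    · rw [PySem.Dict.items_insert, if_pos hc]
      rw [List.forall₂_map_left_iff]
      refine fA.imp ?_
      intro kv h hkv
      by_cases hk : kv.1 = rp
      · rw [if_pos (by simp [hk])]
        exact hk ▸ hkv
      · rw [if_neg (by simp [hk])]
        exact hkv
    · rw [PySem.Dict.items_insert, if_pos hc']
      rw [List.forall₂_map_left_iff]
      refine fB.imp ?_
      intro kv h hkv
      by_cases hk : kv.1 = lp
      · rw [if_pos (by simp [hk])]
        exact hk ▸ hkv
      · rw [if_neg (by simp [hk])]
        exact hkv
    · rw [PySem.Dict.items_insert, if_pos hc, PySem.Dict.items_insert, if_pos hc', ← hgetD]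
      exact crel_replace_snd rp lp (bA.getD rp [] ++ [p]) hCrel
  · -- fresh bucket on both sides: append, hs gains p
    have hcf : bA.contains rp = false := by simpa using hc
    have hcf' : bB.contains lp = false := by rw [← hcontains]; exact hcf
    have hnot : ∀ h ∈ hs, ¬ SameRoot g h p := by
      intro h hh hsr
      obtain ⟨kv, hkv, hR⟩ := forall2_exists_left fA h hh
      obtain ⟨r, h1, h2⟩ := hsr
      have h3 : kv.1 = rp := by
        rw [isRoot_unique hR h1, ← isRoot_unique hrp h2]
      have h4 := List.any_eq_false.mp (by rw [← PySem.Dict.contains]; exact hcf) kv hkv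
      simp [h3] at h4
    refine ⟨hs ++ [p], ?_, ?_, ?_, ?_, ?_⟩
    · intro h hh
      rcases List.mem_append.mp hh with hh | hh
      · exact hKs h hh
      · rw [List.mem_singleton.mp hh]; exact hpK
    · rw [PySem.Dict.items_insert, if_neg (by simp [hcf]),
        PySem.Dict.getD_of_not_contains bA [] hcf]
      exact forall2_append fA (List.forall₂_cons.mpr ⟨hrp, List.Forall₂.nil⟩)
    · rw [PySem.Dict.items_insert, if_neg (by simp [hcf']),
        PySem.Dict.getD_of_not_contains bB [] hcf']
      exact forall2_append fB (List.forall₂_cons.mpr ⟨rfl, List.Forall₂.nil⟩)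
    · rw [PySem.Dict.items_insert, if_neg (by simp [hcf]),
        PySem.Dict.items_insert, if_neg (by simp [hcf']),
        List.map_append, List.map_append, hv,
        PySem.Dict.getD_of_not_contains bA [] hcf, PySem.Dict.getD_of_not_contains bB [] hcf']
      simp
    · rw [List.pairwise_append]
      refine ⟨pw, List.pairwise_singleton _ _, ?_⟩
      intro a ha b hb
      rw [List.mem_singleton.mp hb]
      exact hnot a ha
lemma brel_transfer (g g' : String → String) (comp : PySem.Dict String Int)
    (K : List String) (bA : PySem.Dict String (List String))
    (bB : PySem.Dict Int (List String)) (hs : List String)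
    (hT : Tame g) (tr : ∀ y r, IsRoot g y r → IsRoot g' y r)
    (h : BRel g comp K bA bB hs) : BRel g' comp K bA bB hs := by
  obtain ⟨hKs, fA, fB, hv, pw⟩ := h
  refine ⟨hKs, fA.imp (fun kv h hk => tr _ _ hk), fB, hv, ?_⟩
  exact pw.imp (fun hab hsr => hab ((sameRoot_iff_of_transfer g g' hT tr _ _).mp hsr))

lemma bucket_fold (K : List String) (comp : PySem.Dict String Int) :
    ∀ (ps : List String), (∀ p ∈ ps, p ∈ K) →
    ∀ (parent : PySem.Dict String String) (bA : PySem.Dict String (List String))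
      (bB : PySem.Dict Int (List String)) (hs : List String),
    parent.keys = K → DWF parent → Tame (pstep parent) →
    (∀ a b, a ∈ K → b ∈ K →
      (SameRoot (pstep parent) a b ↔ comp.getD a 0 = comp.getD b 0)) →
    BRel (pstep parent) comp K bA bB hs →
    (ps.foldl bucketStepA (parent, bA)).2.items.map Prod.snd =
    (ps.foldl (fun bk p => bk.modify (comp.getD p 0) [] (fun l => l ++ [p])) bB).items.map
      Prod.snd := by
  intro ps
  induction ps with
  | nil => intro _ parent bA bB hs _ _ _ _ hB; exact hB.2.2.2.1
  | cons p rest ih =>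
    intro hm parent bA bB hs hpk hw ht hpart hB
    rw [List.foldl_cons, List.foldl_cons]
    obtain ⟨k1, w1, t1, r1, tr1⟩ := findRoot_spec parent p hw ht
    have hpK := hm p List.mem_cons_self
    have hpart' : ∀ a b, a ∈ K → b ∈ K →
        (SameRoot (pstep (findRoot parent p).1) a b ↔ comp.getD a 0 = comp.getD b 0) := by
      intro a b ha hb
      rw [sameRoot_iff_of_transfer (pstep parent) _ ht tr1, hpart a b ha hb]
    have hB' := brel_transfer _ _ comp K bA bB hs ht tr1 hB
    have hrp : IsRoot (pstep (findRoot parent p).1) p (findRoot parent p).2 := tr1 _ _ r1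
    obtain ⟨hs', hB2⟩ := brel_step _ comp K bA bB hs hB' p hpK _ hrp
      (fun h hh => hpart' p h hpK hh)
    exact ih (fun q hq => hm q (List.mem_cons_of_mem p hq)) (findRoot parent p).1 _ _ hs'
      (by rw [k1, hpk]) w1 t1 hpart' hB2

lemma groups_items_eq (l1 : List (String × List String)) (l2 : List (Int × List String))
    (h : l1.map Prod.snd = l2.map Prod.snd) :
    (l1.foldl (fun (g : PySem.Dict String (List String)) kv =>
        g.insert ((PySem.List.max? kv.2 PySem.Str.len).getD "")
          (PySem.List.sorted2 kv.2 (fun s => -(PySem.Str.len s)) (fun s => s) false))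
      PySem.Dict.empty).items =
    ((l2.map (fun x => x.2)).foldl (fun (g : PySem.Dict String (List String)) members =>
        g.insert ((PySem.List.max? members PySem.Str.len).getD "")
          (PySem.List.sorted2 members (fun s => -(PySem.Str.len s)) (fun s => s) false))
      PySem.Dict.empty).items := by
  have h' : l1.map (fun x => x.2) = l2.map (fun x => x.2) := h
  rw [← h', List.foldl_map]

lemma main_eq (peptides : List String) :
    union_find_groups_py peptides = union_find_groups_py_alt peptides := by
  unfold union_find_groups_py union_find_groups_py_alt
  have hinv := inv_init peptides
  set K := (peptides.foldl (fun d p => d.insert p p) PySem.Dict.empty).keys with hK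
  have hmemK : ∀ p ∈ peptides, p ∈ K := fun p hp => mem_K_of_mem peptides p hp
  have hmemS : ∀ s ∈ PySem.List.sorted peptides PySem.Str.len true, s ∈ K := by
    intro s hs1
    exact hmemK s ((PySem.List.mem_sorted peptides PySem.Str.len true s).mp hs1)
  have hloop := pairLoop_inv K (PySem.List.sorted peptides PySem.Str.len true) hmemS
    (peptides.foldl (fun d p => d.insert p p) PySem.Dict.empty,
     peptides.foldl (fun d p => d.insert p (0 : Int)) PySem.Dict.empty)
    (peptides.foldl (fun (d : PySem.Dict String Int) p =>
      if d.contains p then d else d.insert p (d.size : Int)) PySem.Dict.empty) hinv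
  obtain ⟨hpk1, hck1, hnd1, hw1, ht1, hpart1⟩ := hloop
  have hB0 : BRel (pstep (pairLoopA (PySem.List.sorted peptides PySem.Str.len true)
      (peptides.foldl (fun d p => d.insert p p) PySem.Dict.empty,
       peptides.foldl (fun d p => d.insert p (0 : Int)) PySem.Dict.empty)).1)
      (pairLoopB (PySem.List.sorted peptides PySem.Str.len true)
        (peptides.foldl (fun (d : PySem.Dict String Int) p =>
          if d.contains p then d else d.insert p (d.size : Int)) PySem.Dict.empty))
      K PySem.Dict.empty PySem.Dict.empty [] := by
    refine ⟨fun h hh => absurd hh (List.not_mem_nil), List.Forall₂.nil, List.Forall₂.nil,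
      rfl, List.Pairwise.nil⟩
  have hsnd := bucket_fold K _ peptides hmemK _ PySem.Dict.empty PySem.Dict.empty []
    hpk1 hw1 ht1 hpart1 hB0
  exact groups_items_eq _ _ hsnd
-- ===== VERDICT (by name: the statement is the Claim_ definition above) =====
theorem union_find_groups_py_spec : Claim_equal_union_find_groups_py := by
  intro peptides _
  unfold Spec_union_find_groups_py
  exact main_eq peptides
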